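-- pv_equiv track=rewrite | github.com/djipko/advent2024 | day7/main.py | equation2
-- ===== SOURCE A (Python) =====
-- def equation2(ops):
--     if not ops:
--         return
--     fst, *rest = ops
--     if not rest:
--         yield fst
--     for oper in ("*", "+", "||"):
--         for res in equation2(rest):
--             match oper:
--                 case "||":
--                     yield int(f"{res}{fst}")
--                 case "*":
--                     yield int(fst) * int(res)
--                 case "+":
--                     yield int(fst) + int(res)
-- ===== SOURCE B (Python) =====
-- def equation2(ops):
--     if not ops:
--         return
--     n = len(ops) - 1
--     combos = [()]
--     for _ in range(n):
--         combos = [(op,) + t for op in ("*", "+", "||") for t in combos]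
--     for t in combos:
--         acc = ops[-1]
--         for fst, op in zip(reversed(ops[:-1]), reversed(t)):
--             if op == "*":
--                 acc = int(fst) * int(acc)
--             elif op == "+":
--                 acc = int(fst) + int(acc)
--             else:
--                 acc = int(f"{acc}{fst}")
--         yield acc
-- ===== Notes on version B (the rewrite author's own statement) =====
-- stated objective: alternative
-- what changed: Replaces A's per-level generator recursion (combine head with every result of the recursive tail, operator by operator) with explicit enumeration of all operator tuples in itertools.product order followed by one right-to-left fold per tuple.
import Mathlib
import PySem

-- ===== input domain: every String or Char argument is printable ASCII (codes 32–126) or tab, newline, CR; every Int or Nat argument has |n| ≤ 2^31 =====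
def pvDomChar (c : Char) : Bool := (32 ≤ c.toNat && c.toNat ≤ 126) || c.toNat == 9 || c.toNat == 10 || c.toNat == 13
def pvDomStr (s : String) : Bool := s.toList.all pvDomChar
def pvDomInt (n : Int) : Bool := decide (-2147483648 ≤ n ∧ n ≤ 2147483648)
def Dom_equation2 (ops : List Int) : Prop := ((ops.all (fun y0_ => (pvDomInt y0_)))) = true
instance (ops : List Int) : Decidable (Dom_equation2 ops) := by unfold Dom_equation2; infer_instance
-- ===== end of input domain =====

-- B replaces A's per-level recursion (which yields all results of the tail and combines each
-- with the head, operator by operator) by an explicit enumeration of all operator tuples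
-- (itertools.product order) followed by one right-to-left fold per tuple (objective: alternative).

-- int(f"{res}{fst}"): decimal concatenation, then int();
-- under Pre_ (fst ≥ 0) the parse always succeeds, so getD 0 never fires.
def pvConcat (res fst : Int) : Int :=
  (PySem.Int.ofChars? (PySem.Int.toChars res ++ PySem.Int.toChars fst)).getD 0

-- ===== PORT A =====
def equation2 (ops : List Int) : List Int :=
  match ops with
  | [] => []
  | fst :: rest =>
    (if rest.isEmpty then [fst] else []) ++
    ["*", "+", "||"].flatMap (fun oper =>
      (equation2 rest).map (fun res =>
        if oper = "||" then pvConcat res fst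
        else if oper = "*" then fst * res
        else fst + res))

-- ===== PORT B =====
def equation2_alt (ops : List Int) : List Int :=
  if ops.isEmpty then []
  else
    let n := ops.length - 1
    let combos : List (List String) :=
      (List.range n).foldl
        (fun cs _ => ["*", "+", "||"].flatMap (fun op => cs.map (fun t => op :: t)))
        [[]]
    combos.map (fun t =>
      ((ops.dropLast.zip t).reverse).foldl
        (fun acc p =>
          if p.2 = "*" then p.1 * acc
          else if p.2 = "+" then p.1 + acc
          else pvConcat acc p.1)
        (PySem.List.pyGetD ops (-1) 0))

-- ===== PRECONDITION & SPEC =====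
-- Pre_ excludes exactly the inputs where Python A raises ValueError: some element before the
-- last is negative, so the "||" branch's int(f"{res}{fst}") parses a string with an inner '-'.
def Pre_equation2 (ops : List Int) : Prop := ∀ x ∈ ops.dropLast, 0 ≤ x
instance (ops : List Int) : Decidable (Pre_equation2 ops) := by unfold Pre_equation2; infer_instance
def pvWitness_equation2 : List Int := ([2, 3, -4] : List Int)

def Spec_equation2 (ops : List Int) (out : List Int) : Prop := out = equation2_alt ops
instance (ops : List Int) (out : List Int) : Decidable (Spec_equation2 ops out) := by unfold Spec_equation2; infer_instance

-- ===== CLAIM (what is proved, stated in full; the proofs are below) =====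
def Claim_equal_equation2 : Prop := ∀ (ops : List Int), Dom_equation2 ops → Pre_equation2 ops → Spec_equation2 ops (equation2 ops)

-- ===== LEMMAS AND PROOFS =====

-- abbreviations for B's pieces, used only in the proofs
def pvCombos (n : Nat) : List (List String) :=
  (List.range n).foldl
    (fun cs _ => ["*", "+", "||"].flatMap (fun op => cs.map (fun t => op :: t)))
    [[]]

def pvEval (ops : List Int) (t : List String) : Int :=
  ((ops.dropLast.zip t).reverse).foldl
    (fun acc p =>
      if p.2 = "*" then p.1 * acc
      else if p.2 = "+" then p.1 + acc
      else pvConcat acc p.1)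
    (PySem.List.pyGetD ops (-1) 0)

lemma pvCombos_succ (n : Nat) :
    pvCombos (n + 1) = ["*", "+", "||"].flatMap (fun op => (pvCombos n).map (fun t => op :: t)) := by
  simp [pvCombos, List.range_succ]

lemma equation2_alt_eq (ops : List Int) (h : ops ≠ []) :
    equation2_alt ops = (pvCombos (ops.length - 1)).map (pvEval ops) := by
  cases ops with
  | nil => simp at h
  | cons a l => simp [equation2_alt, pvCombos, pvEval]

lemma pvEval_cons (fst : Int) (rest : List Int) (h : rest ≠ []) (op : String) (t : List String) :
    pvEval (fst :: rest) (op :: t) =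
      (fun acc => if op = "*" then fst * acc
                  else if op = "+" then fst + acc
                  else pvConcat acc fst) (pvEval rest t) := by
  cases rest with
  | nil => simp at h
  | cons b l =>
    simp [pvEval, List.dropLast_cons_of_ne_nil, PySem.List.pyGetD_neg_one, List.foldl_append]

lemma equation2_eq_alt (ops : List Int) : equation2 ops = equation2_alt ops := by
  induction ops with
  | nil => simp [equation2, equation2_alt]
  | cons fst rest ih =>
    cases hr : rest with
    | nil =>
      subst hr
      simp [equation2, equation2_alt, PySem.List.pyGetD, PySem.List.pyGet?, PySem.List.pyIdx?]
    | cons b l =>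
      subst hr
      have hne : (b :: l) ≠ [] := by simp
      have hA : equation2 (fst :: (b :: l)) =
          ["*", "+", "||"].flatMap (fun oper =>
            (equation2 (b :: l)).map (fun res =>
              if oper = "||" then pvConcat res fst
              else if oper = "*" then fst * res
              else fst + res)) := by
        rw [equation2]
        simp
      have hB : equation2_alt (fst :: (b :: l)) =
          (pvCombos ((fst :: (b :: l)).length - 1)).map (pvEval (fst :: (b :: l))) :=
        equation2_alt_eq _ (by simp)
      have hlen2 : (fst :: (b :: l)).length - 1 = (b :: l).length - 1 + 1 := by
        simp
      rw [hA, hB, hlen2, pvCombos_succ, List.map_flatMap]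
      have hrest : equation2 (b :: l) = (pvCombos ((b :: l).length - 1)).map (pvEval (b :: l)) := by
        rw [ih, equation2_alt_eq (b :: l) hne]
      rw [hrest]
      simp only [List.flatMap_cons, List.flatMap_nil, List.append_nil]
      congr 1
      · rw [List.map_map, List.map_map]
        refine List.map_congr_left (fun t _ => ?_)
        simp [pvEval_cons fst (b :: l) hne]
      congr 1
      · rw [List.map_map, List.map_map]
        refine List.map_congr_left (fun t _ => ?_)
        simp [pvEval_cons fst (b :: l) hne]
      · rw [List.map_map, List.map_map]
        refine List.map_congr_left (fun t _ => ?_)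
        simp [pvEval_cons fst (b :: l) hne]

-- ===== VERDICT (by name: the statement is the Claim_ definition above) =====
theorem equation2_spec : Claim_equal_equation2 := by
  intro ops _ _
  unfold Spec_equation2
  exact equation2_eq_alt ops
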